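-- pv_equiv track=rewrite | github.com/DeanHe/Practice | LeetCodePython/RemoveMethodsFromProject.py | remainingMethods
-- ===== SOURCE A (Python) =====
-- from collections import defaultdict, deque
-- from typing import List
--
-- def remainingMethods(n: int, k: int, invocations: List[List[int]]) -> List[int]:
--     bugs = {k}
--     parents = defaultdict(list)
--     graph = defaultdict(list)
--     for s, e in invocations:
--         graph[s].append(e)
--         parents[e].append(s)
--     q = deque([k])
--     while q:
--         cur = q.popleft()
--         for nb in graph[cur]:
--             if nb not in bugs:
--                 bugs.add(nb)
--                 q.append(nb)
--     for i in bugs: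
--         for fa in parents[i]:
--             if fa not in bugs:
--                 return list(range(n))
--     return [i for i in range(n) if i not in bugs]
-- ===== SOURCE B (Python) =====
-- from typing import List
--
-- def remainingMethods(n: int, k: int, invocations: List[List[int]]) -> List[int]:
--     # fixpoint relaxation over the edge list: no adjacency dict, no queue
--     bugs = {k}
--     changed = True
--     while changed:
--         changed = False
--         for s, e in invocations:
--             if s in bugs and e not in bugs:
--                 bugs.add(e)
--                 changed = True
--     if any(e in bugs and s not in bugs for s, e in invocations):
--         return list(range(n))
--     return [i for i in range(n) if i not in bugs]
-- ===== Notes on version B (the rewrite author's own statement) =====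
-- stated objective: simpler
-- what changed: B replaces A's dict-based BFS (forward adjacency + parents reverse index + deque) by a Bellman-Ford-style fixpoint: it repeatedly relaxes the raw edge list until the buggy set stops growing, then decides the early return by one direct scan of the edges; no dictionaries or queue exist in B.
import Mathlib
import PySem

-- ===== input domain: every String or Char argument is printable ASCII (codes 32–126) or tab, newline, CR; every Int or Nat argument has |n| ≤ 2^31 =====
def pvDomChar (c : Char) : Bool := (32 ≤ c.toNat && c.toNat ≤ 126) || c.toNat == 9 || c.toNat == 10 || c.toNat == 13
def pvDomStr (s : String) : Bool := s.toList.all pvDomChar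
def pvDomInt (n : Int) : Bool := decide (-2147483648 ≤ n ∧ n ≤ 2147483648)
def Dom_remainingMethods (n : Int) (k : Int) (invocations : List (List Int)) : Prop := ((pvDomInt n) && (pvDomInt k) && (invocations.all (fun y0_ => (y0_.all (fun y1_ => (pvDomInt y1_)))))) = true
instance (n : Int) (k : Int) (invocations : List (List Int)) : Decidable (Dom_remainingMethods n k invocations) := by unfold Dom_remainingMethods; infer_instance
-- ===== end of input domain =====

-- B replaces A's dict-based BFS (adjacency dict + parents reverse index + deque) by a
-- Bellman-Ford-style fixpoint over the raw edge list, and decides the early return by one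
-- direct edge scan (objective: simpler — no dictionaries, no queue).

-- ===== PORT A =====
-- builds (graph, parents) exactly as A's single `for s, e in invocations` loop
-- (rows that are not 2-element lists make Python raise ValueError — excluded by Pre_;
--  the wildcard arm skips them, which is never exercised inside Pre_)
def pvBuildMapsA (invocations : List (List Int)) :
    PySem.Dict Int (List Int) × PySem.Dict Int (List Int) :=
  invocations.foldl
    (fun gp row =>
      match row with
      | [s, e] => (gp.1.modify s [] (· ++ [e]), gp.2.modify e [] (· ++ [s]))
      | _ => gp)
    (PySem.Dict.empty, PySem.Dict.empty)

-- body of A's `for nb in graph[cur]:` loop, on the state (queue, bugs)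
def pvStepA (st : List Int × PySem.Set Int) (nb : Int) : List Int × PySem.Set Int :=
  if PySem.Set.contains st.2 nb then st else (st.1 ++ [nb], PySem.Set.add st.2 nb)

-- A's `while q:` BFS; fuel `invocations.length + 1` bounds the number of pops, since each
-- enqueue after the initial one coincides with a strict growth of `bugs` by an edge target
def pvBfsA (graph : PySem.Dict Int (List Int)) :
    Nat → List Int → PySem.Set Int → PySem.Set Int
  | 0, _, bugs => bugs
  | _ + 1, [], bugs => bugs
  | fuel + 1, cur :: q, bugs =>
    let st := (graph.getD cur []).foldl pvStepA (q, bugs)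
    pvBfsA graph fuel st.1 st.2

def remainingMethods (n : Int) (k : Int) (invocations : List (List Int)) : List Int :=
  let gp := pvBuildMapsA invocations
  let bugs := pvBfsA gp.1 (invocations.length + 1) [k] (PySem.Set.ofList [k])
  -- `for i in bugs: for fa in parents[i]: if fa not in bugs: return list(range(n))`
  -- (order of iteration over the set is irrelevant: the loop only decides existence)
  if bugs.any (fun i => (gp.2.getD i []).any (fun fa => !(PySem.Set.contains bugs fa))) then
    PySem.List.pyRange 0 n 1
  else
    (PySem.List.pyRange 0 n 1).filter (fun i => !(PySem.Set.contains bugs i))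

-- ===== PORT B =====
-- body of B's `for s, e in invocations:` relaxation loop, on the state (bugs, changed)
def pvRelaxB (st : PySem.Set Int × Bool) (row : List Int) : PySem.Set Int × Bool :=
  match row with
  | [s, e] =>
    if PySem.Set.contains st.1 s && !(PySem.Set.contains st.1 e) then
      (PySem.Set.add st.1 e, true)
    else st
  | _ => st

-- one `for s, e in invocations` pass with `changed = False` at its start
def pvPassB (invocations : List (List Int)) (bugs : PySem.Set Int) : PySem.Set Int × Bool :=
  invocations.foldl pvRelaxB (bugs, false)

-- B's `while changed:` loop; fuel `invocations.length + 1` passes suffice, since every pass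
-- with changed=True strictly grows `bugs`, which stays inside {k} ∪ edge targets
def pvLoopB (invocations : List (List Int)) : Nat → PySem.Set Int → PySem.Set Int
  | 0, bugs => bugs
  | fuel + 1, bugs =>
    let st := pvPassB invocations bugs
    if st.2 then pvLoopB invocations fuel st.1 else st.1

def remainingMethods_alt (n : Int) (k : Int) (invocations : List (List Int)) : List Int :=
  let bugs := pvLoopB invocations (invocations.length + 1) (PySem.Set.ofList [k])
  -- `any(e in bugs and s not in bugs for s, e in invocations)`
  if invocations.any (fun row =>
      match row with
      | [s, e] => PySem.Set.contains bugs e && !(PySem.Set.contains bugs s)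
      | _ => false) then
    PySem.List.pyRange 0 n 1
  else
    (PySem.List.pyRange 0 n 1).filter (fun i => !(PySem.Set.contains bugs i))

-- ===== PRECONDITION & SPEC =====
-- Pre_ excludes invocation rows that are not 2-element lists: Python's `for s, e in invocations`
-- raises ValueError on them, so A returns no value there.
def Pre_remainingMethods (n : Int) (k : Int) (invocations : List (List Int)) : Prop :=
  ∀ row ∈ invocations, row.length = 2
instance (n : Int) (k : Int) (invocations : List (List Int)) : Decidable (Pre_remainingMethods n k invocations) := by unfold Pre_remainingMethods; infer_instance

def pvWitness_remainingMethods : Int × Int × List (List Int) := (4, 0, [[0, 1], [2, 1]])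

def Spec_remainingMethods (n : Int) (k : Int) (invocations : List (List Int)) (out : List Int) : Prop := out = remainingMethods_alt n k invocations
instance (n : Int) (k : Int) (invocations : List (List Int)) (out : List Int) : Decidable (Spec_remainingMethods n k invocations out) := by unfold Spec_remainingMethods; infer_instance

-- ===== CLAIM (what is proved, stated in full; the proofs are below) =====
def Claim_equal_remainingMethods : Prop := ∀ (n : Int) (k : Int) (invocations : List (List Int)), Dom_remainingMethods n k invocations → Pre_remainingMethods n k invocations → Spec_remainingMethods n k invocations (remainingMethods n k invocations)

-- ===== LEMMAS AND PROOFS =====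

-- reachability from k along the invocation edges: the set both traversals compute
inductive PvReach (inv : List (List Int)) (k : Int) : Int → Prop
  | base : PvReach inv k k
  | step {s e : Int} : PvReach inv k s → [s, e] ∈ inv → PvReach inv k e

-- the targets (second components) of the 2-element rows: everything either loop can add
def pvTargets (inv : List (List Int)) : List Int :=
  inv.filterMap (fun row => match row with | [_, e] => some e | _ => none)

theorem mem_pvTargets {inv : List (List Int)} {s e : Int} (h : [s, e] ∈ inv) :
    e ∈ pvTargets inv := by
  unfold pvTargets
  exact List.mem_filterMap.mpr ⟨[s, e], h, rfl⟩

-- the universe that bounds the growth of `bugs` in both loops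
def pvUniv (inv : List (List Int)) (k : Int) : Finset Int :=
  insert k (pvTargets inv).toFinset

theorem pvUniv_card_le (inv : List (List Int)) (k : Int) :
    (pvUniv inv k).card ≤ inv.length + 1 := by
  have h1 : (pvUniv inv k).card ≤ (pvTargets inv).toFinset.card + 1 :=
    Finset.card_insert_le _ _
  have h2 : (pvTargets inv).toFinset.card ≤ (pvTargets inv).length :=
    List.toFinset_card_le _
  have h3 : (pvTargets inv).length ≤ inv.length := List.length_filterMap_le _ _
  omega

theorem pv_len_le_univ {inv : List (List Int)} {k : Int} {bugs : PySem.Set Int}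
    (hnd : bugs.Nodup) (hsub : ∀ x ∈ bugs, x = k ∨ x ∈ pvTargets inv) :
    bugs.length ≤ (pvUniv inv k).card := by
  have hcard : bugs.toFinset.card = bugs.length := List.toFinset_card_of_nodup hnd
  have hss : bugs.toFinset ⊆ pvUniv inv k := by
    intro x hx
    rcases hsub x (List.mem_toFinset.mp hx) with h | h
    · subst h; exact Finset.mem_insert_self _ _
    · exact Finset.mem_insert_of_mem (List.mem_toFinset.mpr h)
  have := Finset.card_le_card hss
  omega

-- fa ∈ parents[e] iff the edge [fa, e] occurs in the invocations
theorem mem_parents (l : List (List Int)) :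
    ∀ (g p : PySem.Dict Int (List Int)) (e fa : Int),
      (fa ∈ ((l.foldl (fun gp row =>
        match row with
        | [s, e] => (gp.1.modify s [] (· ++ [e]), gp.2.modify e [] (· ++ [s]))
        | _ => gp) (g, p)).2.getD e [])
      ↔ fa ∈ p.getD e [] ∨ [fa, e] ∈ l) := by
  induction l with
  | nil => intro g p e fa; simp
  | cons row rest ih =>
    intro g p e fa
    rcases row with _ | ⟨a, _ | ⟨b, _ | ⟨c, t⟩⟩⟩
    · simpa using (ih g p e fa).trans (by simp)
    · simpa using (ih _ _ e fa).trans (by simp)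
    · simp only [List.foldl_cons]
      rw [ih]
      rw [PySem.Dict.getD_modify]
      constructor
      · rintro (h | h)
        · split_ifs at h with hb
          · rcases List.mem_append.mp h with h' | h'
            · subst hb; exact Or.inl h'
            · simp at h'; subst h'; subst hb; right; simp
          · exact Or.inl h
        · right; simp [h]
      · rintro (h | h)
        · split_ifs with hb
          · subst hb; exact Or.inl (List.mem_append.mpr (Or.inl h))
          · exact Or.inl h
        · rcases List.mem_cons.mp h with h' | h'
          · obtain ⟨h1, h2⟩ : fa = a ∧ e = b := by simpa using h'
            subst h1; subst h2
            left; rw [if_pos rfl]; simp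
          · right; exact h'
    · simpa using (ih _ _ e fa).trans (by simp)

-- b ∈ graph[a] iff the edge [a, b] occurs in the invocations
theorem mem_graph (l : List (List Int)) :
    ∀ (g p : PySem.Dict Int (List Int)) (a b : Int),
      (b ∈ ((l.foldl (fun gp row =>
        match row with
        | [s, e] => (gp.1.modify s [] (· ++ [e]), gp.2.modify e [] (· ++ [s]))
        | _ => gp) (g, p)).1.getD a [])
      ↔ b ∈ g.getD a [] ∨ [a, b] ∈ l) := by
  induction l with
  | nil => intro g p a b; simp
  | cons row rest ih =>
    intro g p a b
    rcases row with _ | ⟨x, _ | ⟨y, _ | ⟨z, t⟩⟩⟩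
    · simpa using (ih g p a b).trans (by simp)
    · simpa using (ih _ _ a b).trans (by simp)
    · simp only [List.foldl_cons]
      rw [ih]
      rw [PySem.Dict.getD_modify]
      constructor
      · rintro (h | h)
        · split_ifs at h with hb
          · rcases List.mem_append.mp h with h' | h'
            · subst hb; exact Or.inl h'
            · simp at h'; subst h'; subst hb; right; simp
          · exact Or.inl h
        · right; simp [h]
      · rintro (h | h)
        · split_ifs with hb
          · subst hb; exact Or.inl (List.mem_append.mpr (Or.inl h))
          · exact Or.inl h
        · rcases List.mem_cons.mp h with h' | h'
          · obtain ⟨h1, h2⟩ : a = x ∧ b = y := by simpa using h'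
            subst h1; subst h2
            left; rw [if_pos rfl]; simp
          · right; exact h'
    · simpa using (ih _ _ a b).trans (by simp)

theorem mem_graphA {inv : List (List Int)} {a b : Int} :
    b ∈ ((pvBuildMapsA inv).1.getD a []) ↔ [a, b] ∈ inv := by
  unfold pvBuildMapsA
  rw [mem_graph]
  simp [PySem.Dict.getD_empty]

theorem mem_parentsA {inv : List (List Int)} {e fa : Int} :
    fa ∈ ((pvBuildMapsA inv).2.getD e []) ↔ [fa, e] ∈ inv := by
  unfold pvBuildMapsA
  rw [mem_parents]
  simp [PySem.Dict.getD_empty]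

-- everything the inner BFS fold does, in one invariant
theorem bfs_fold_facts (L : List Int) :
    ∀ (q0 : List Int) (b0 : PySem.Set Int),
      (∀ x ∈ b0, x ∈ (L.foldl pvStepA (q0, b0)).2) ∧
      (∀ nb ∈ L, nb ∈ (L.foldl pvStepA (q0, b0)).2) ∧
      (∃ t, (L.foldl pvStepA (q0, b0)).1 = q0 ++ t ∧
        (∀ x ∈ t, x ∈ (L.foldl pvStepA (q0, b0)).2 ∧ x ∈ L) ∧
        (∀ x ∈ (L.foldl pvStepA (q0, b0)).2, x ∈ b0 ∨ x ∈ t)) ∧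
      (b0.Nodup → (L.foldl pvStepA (q0, b0)).2.Nodup) ∧
      ((L.foldl pvStepA (q0, b0)).1.length + b0.length
        = q0.length + (L.foldl pvStepA (q0, b0)).2.length) := by
  induction L with
  | nil =>
    intro q0 b0
    exact ⟨fun x h => h, by simp, ⟨[], by simp, by simp, fun x h => Or.inl h⟩,
      fun h => h, by simp⟩
  | cons nb L ih =>
    intro q0 b0
    by_cases hc : PySem.Set.contains b0 nb = true
    · have hstep : pvStepA (q0, b0) nb = (q0, b0) := by
        unfold pvStepA; rw [if_pos hc]
      simp only [List.foldl_cons, hstep]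
      obtain ⟨h1, h2, ⟨t, ht1, ht2, ht3⟩, h4, h5⟩ := ih q0 b0
      refine ⟨h1, ?_, ⟨t, ht1, fun x hx => ⟨(ht2 x hx).1, List.mem_cons_of_mem _ (ht2 x hx).2⟩, ht3⟩, h4, h5⟩
      intro x hx
      rcases List.mem_cons.mp hx with h | h
      · subst h; exact h1 x ((PySem.Set.contains_iff _ _).mp hc)
      · exact h2 x h
    · have hnm : nb ∉ b0 := fun h => hc ((PySem.Set.contains_iff _ _).mpr h)
      have hstep : pvStepA (q0, b0) nb = (q0 ++ [nb], PySem.Set.add b0 nb) := by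
        unfold pvStepA; rw [if_neg hc]
      simp only [List.foldl_cons, hstep]
      obtain ⟨h1, h2, ⟨t, ht1, ht2, ht3⟩, h4, h5⟩ := ih (q0 ++ [nb]) (PySem.Set.add b0 nb)
      have hadd : ∀ x ∈ b0, x ∈ PySem.Set.add b0 nb := by
        intro x hx; exact (PySem.Set.mem_add _ _ _).mpr (Or.inl hx)
      have hnbmem : nb ∈ PySem.Set.add b0 nb := (PySem.Set.mem_add _ _ _).mpr (Or.inr rfl)
      refine ⟨fun x hx => h1 x (hadd x hx), ?_, ⟨nb :: t, ?_, ?_, ?_⟩, ?_, ?_⟩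
      · intro x hx
        rcases List.mem_cons.mp hx with h | h
        · rw [h]; exact h1 nb hnbmem
        · exact h2 x h
      · rw [ht1]; simp
      · intro x hx
        rcases List.mem_cons.mp hx with h | h
        · subst h; exact ⟨h1 x hnbmem, List.mem_cons_self⟩
        · exact ⟨(ht2 x h).1, List.mem_cons_of_mem _ (ht2 x h).2⟩
      · intro x hx
        rcases ht3 x hx with h | h
        · rcases (PySem.Set.mem_add _ _ _).mp h with h' | h'
          · exact Or.inl h'
          · exact Or.inr (by simp [h'])
        · exact Or.inr (List.mem_cons_of_mem _ h)
      · intro hnd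
        exact h4 (PySem.Set.nodup_add _ _ hnd)
      · have hlen : (PySem.Set.add b0 nb).length = b0.length + 1 := by
          rw [PySem.Set.add_of_not_mem hnm]; simp
        rw [hlen] at h5
        simp only [List.length_append, List.length_cons, List.length_nil] at h5 ⊢
        omega

-- the BFS result contains its starting set and, with enough fuel, is edge-closed
theorem bfsA_closed (inv : List (List Int)) (k : Int) :
    ∀ (fuel : Nat) (q : List Int) (bugs : PySem.Set Int),
      (∀ x ∈ q, x ∈ bugs) →
      (∀ x ∈ bugs, x ∈ q ∨ ∀ e, [x, e] ∈ inv → e ∈ bugs) →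
      bugs.Nodup →
      (∀ x ∈ bugs, x = k ∨ x ∈ pvTargets inv) →
      q.length + (pvUniv inv k).card ≤ fuel + bugs.length →
      (∀ x ∈ bugs, x ∈ pvBfsA (pvBuildMapsA inv).1 fuel q bugs) ∧
      (∀ x ∈ pvBfsA (pvBuildMapsA inv).1 fuel q bugs,
        ∀ e, [x, e] ∈ inv → e ∈ pvBfsA (pvBuildMapsA inv).1 fuel q bugs) := by
  intro fuel
  induction fuel with
  | zero =>
    intro q bugs hq hC hnd hU hcnt
    have hle := pv_len_le_univ hnd hU
    have hq0 : q = [] := by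
      cases q with
      | nil => rfl
      | cons a q' => simp only [List.length_cons] at hcnt; omega
    subst hq0
    refine ⟨fun x h => h, ?_⟩
    intro x hx e he
    rcases hC x hx with h | h
    · simp at h
    · exact h e he
  | succ fuel ih =>
    intro q bugs hq hC hnd hU hcnt
    cases q with
    | nil =>
      refine ⟨fun x h => h, ?_⟩
      intro x hx e he
      rcases hC x hx with h | h
      · simp at h
      · exact h e he
    | cons cur rest =>
      simp only [pvBfsA]
      obtain ⟨h1, h2, ⟨t, ht1, ht2, ht3⟩, h4, h5⟩ :=
        bfs_fold_facts ((pvBuildMapsA inv).1.getD cur []) rest bugs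
      set st := (((pvBuildMapsA inv).1.getD cur []).foldl pvStepA (rest, bugs)) with hst
      have hLsub : ∀ nb ∈ (pvBuildMapsA inv).1.getD cur [], nb ∈ pvTargets inv := by
        intro nb hnb
        exact mem_pvTargets (mem_graphA.mp hnb)
      have hq' : ∀ x ∈ st.1, x ∈ st.2 := by
        intro x hx
        rw [ht1] at hx
        rcases List.mem_append.mp hx with h | h
        · exact h1 x (hq x (List.mem_cons_of_mem _ h))
        · exact (ht2 x h).1
      have hC' : ∀ x ∈ st.2, x ∈ st.1 ∨ ∀ e, [x, e] ∈ inv → e ∈ st.2 := by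
        intro x hx
        rcases ht3 x hx with hxb | hxt
        · rcases hC x hxb with hxq | hcl
          · rcases List.mem_cons.mp hxq with h | h
            · subst h
              right
              intro e he
              exact h2 e (mem_graphA.mpr he)
            · left; rw [ht1]; exact List.mem_append.mpr (Or.inl h)
          · right; intro e he; exact h1 e (hcl e he)
        · left; rw [ht1]; exact List.mem_append.mpr (Or.inr hxt)
      have hnd' : st.2.Nodup := h4 hnd
      have hU' : ∀ x ∈ st.2, x = k ∨ x ∈ pvTargets inv := by
        intro x hx
        rcases ht3 x hx with h | h
        · exact hU x h
        · exact Or.inr (hLsub x (ht2 x h).2)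
      have hcnt' : st.1.length + (pvUniv inv k).card ≤ fuel + st.2.length := by
        simp only [List.length_cons] at hcnt
        omega
      obtain ⟨ihm, ihc⟩ := ih st.1 st.2 hq' hC' hnd' hU' hcnt'
      exact ⟨fun x hx => ihm x (h1 x hx), ihc⟩

-- the BFS result only contains reachable methods
theorem bfsA_sound (inv : List (List Int)) (k : Int) :
    ∀ (fuel : Nat) (q : List Int) (bugs : PySem.Set Int),
      (∀ x ∈ q, PvReach inv k x) → (∀ x ∈ bugs, PvReach inv k x) →
      ∀ x ∈ pvBfsA (pvBuildMapsA inv).1 fuel q bugs, PvReach inv k x := by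
  intro fuel
  induction fuel with
  | zero => intro q bugs _ hb x hx; exact hb x hx
  | succ fuel ih =>
    intro q bugs hq hb
    cases q with
    | nil => exact fun x hx => hb x hx
    | cons cur rest =>
      simp only [pvBfsA]
      obtain ⟨h1, h2, ⟨t, ht1, ht2, ht3⟩, h4, h5⟩ :=
        bfs_fold_facts ((pvBuildMapsA inv).1.getD cur []) rest bugs
      set st := (((pvBuildMapsA inv).1.getD cur []).foldl pvStepA (rest, bugs)) with hst
      have hLr : ∀ nb ∈ (pvBuildMapsA inv).1.getD cur [], PvReach inv k nb := by
        intro nb hnb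
        exact PvReach.step (hq cur List.mem_cons_self) (mem_graphA.mp hnb)
      have hb' : ∀ x ∈ st.2, PvReach inv k x := by
        intro x hx
        rcases ht3 x hx with h | h
        · exact hb x h
        · exact hLr x (ht2 x h).2
      have hq' : ∀ x ∈ st.1, PvReach inv k x := by
        intro x hx
        rw [ht1] at hx
        rcases List.mem_append.mp hx with h | h
        · exact hq x (List.mem_cons_of_mem _ h)
        · exact hb' x (ht2 x h).1
      exact ih st.1 st.2 hq' hb'

-- membership of A's bug set = reachability
theorem bugsA_iff (inv : List (List Int)) (k : Int) (x : Int) :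
    x ∈ pvBfsA (pvBuildMapsA inv).1 (inv.length + 1) [k] (PySem.Set.ofList [k])
      ↔ PvReach inv k x := by
  have hof : PySem.Set.ofList [k] = [k] := rfl
  constructor
  · intro hx
    refine bfsA_sound inv k _ [k] _ ?_ ?_ x hx
    · intro y hy; simp at hy; subst hy; exact PvReach.base
    · intro y hy; rw [hof] at hy; simp at hy; subst hy; exact PvReach.base
  · intro hr
    have hcnt : ([k] : List Int).length + (pvUniv inv k).card
        ≤ (inv.length + 1) + (PySem.Set.ofList [k] : List Int).length := by
      have := pvUniv_card_le inv k
      rw [hof]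
      simp only [List.length_cons, List.length_nil]
      omega
    obtain ⟨hm, hc⟩ := bfsA_closed inv k (inv.length + 1) [k] (PySem.Set.ofList [k])
      (by intro y hy; rw [hof]; exact hy)
      (by intro y hy; rw [hof] at hy; exact Or.inl hy)
      (PySem.Set.nodup_ofList _)
      (by intro y hy; rw [hof] at hy; simp at hy; exact Or.inl hy)
      hcnt
    induction hr with
    | base => exact hm k (by rw [hof]; exact List.mem_cons_self)
    | step hs he ihr => exact hc _ ihr _ he

-- facts about one relaxation pass of B
theorem passB_fold_facts (inv : List (List Int)) :
    ∀ (l : List (List Int)) (b0 : PySem.Set Int) (c0 : Bool),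
      (∀ row ∈ l, row ∈ inv) →
      (∀ x ∈ b0, x ∈ (l.foldl pvRelaxB (b0, c0)).1) ∧
      (∀ x ∈ (l.foldl pvRelaxB (b0, c0)).1, x ∈ b0 ∨ x ∈ pvTargets inv) ∧
      (b0.Nodup → (l.foldl pvRelaxB (b0, c0)).1.Nodup) ∧
      (c0 = true → (l.foldl pvRelaxB (b0, c0)).2 = true) ∧
      ((l.foldl pvRelaxB (b0, c0)).2 = false →
        (l.foldl pvRelaxB (b0, c0)).1 = b0 ∧
        ∀ s e, [s, e] ∈ l → s ∈ b0 → e ∈ b0) ∧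
      (b0.length ≤ (l.foldl pvRelaxB (b0, c0)).1.length) ∧
      (c0 = false → (l.foldl pvRelaxB (b0, c0)).2 = true →
        b0.length < (l.foldl pvRelaxB (b0, c0)).1.length) := by
  intro l
  induction l with
  | nil =>
    intro b0 c0 _
    refine ⟨fun x h => h, fun x h => Or.inl h, fun h => h, fun h => h, ?_, le_refl _, ?_⟩
    · intro _; exact ⟨rfl, by simp⟩
    · intro h1 h2; rw [h1] at h2; exact absurd h2 (by simp)
  | cons row l ih =>
    intro b0 c0 hsub
    have hrow : row ∈ inv := hsub row List.mem_cons_self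
    have hsub' : ∀ r ∈ l, r ∈ inv := fun r hr => hsub r (List.mem_cons_of_mem _ hr)
    rcases hfire : pvRelaxB (b0, c0) row with ⟨b1, c1⟩
    have hcases : (b1 = b0 ∧ c1 = c0) ∨
        (∃ s e, row = [s, e] ∧ s ∈ b0 ∧ e ∉ b0 ∧ b1 = b0 ++ [e] ∧ c1 = true) := by
      unfold pvRelaxB at hfire
      rcases row with _ | ⟨s, _ | ⟨e, _ | ⟨z, t⟩⟩⟩
      · left; exact ⟨congrArg Prod.fst hfire.symm, congrArg Prod.snd hfire.symm⟩
      · left; exact ⟨congrArg Prod.fst hfire.symm, congrArg Prod.snd hfire.symm⟩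
      · have hfire2 : (if (PySem.Set.contains b0 s && !(PySem.Set.contains b0 e)) = true
            then (PySem.Set.add b0 e, true) else ((b0, c0) : PySem.Set Int × Bool)) = (b1, c1) := hfire
        by_cases hc : (PySem.Set.contains b0 s && !(PySem.Set.contains b0 e)) = true
        · rw [if_pos hc] at hfire2
          right
          have hs : s ∈ b0 := (PySem.Set.contains_iff _ _).mp (by
            have := (Bool.and_eq_true _ _).mp hc; exact this.1)
          have he : e ∉ b0 := by
            have := (Bool.and_eq_true _ _).mp hc
            intro hmem
            have := this.2
            rw [(PySem.Set.contains_iff _ _).mpr hmem] at this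
            simp at this
          refine ⟨s, e, rfl, hs, he, ?_, congrArg Prod.snd hfire2.symm⟩
          have : b1 = PySem.Set.add b0 e := (congrArg Prod.fst hfire2).symm
          rw [this, PySem.Set.add_of_not_mem he]
        · rw [if_neg hc] at hfire2
          left; exact ⟨congrArg Prod.fst hfire2.symm, congrArg Prod.snd hfire2.symm⟩
      · left; exact ⟨congrArg Prod.fst hfire.symm, congrArg Prod.snd hfire.symm⟩
    simp only [List.foldl_cons, hfire]
    obtain ⟨i1, i2, i3, i4, i5, i6, i7⟩ := ih b1 c1 hsub'
    rcases hcases with ⟨hb, hc⟩ | ⟨s, e, hre, hs, he, hb, hc⟩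
    · subst hb; subst hc
      refine ⟨i1, i2, i3, i4, ?_, i6, i7⟩
      intro hf
      obtain ⟨hfix, hcl⟩ := i5 hf
      refine ⟨hfix, ?_⟩
      intro s e hmem hsb
      rcases List.mem_cons.mp hmem with h | h
      · -- row = [s, e] did not fire although it was examined: s ∈ b0 → e ∈ b0
        subst h
        by_contra heb
        have hfi : (if (PySem.Set.contains b1 s && !(PySem.Set.contains b1 e)) = true
            then (PySem.Set.add b1 e, true) else ((b1, c1) : PySem.Set Int × Bool))
            = (b1, c1) := hfire
        have hb1 : PySem.Set.contains b1 s = true := (PySem.Set.contains_iff _ _).mpr hsb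
        have hb2 : PySem.Set.contains b1 e = false := by
          rcases hcc : PySem.Set.contains b1 e with _ | _
          · rfl
          · exact absurd ((PySem.Set.contains_iff _ _).mp hcc) heb
        have hcnd : (PySem.Set.contains b1 s && !(PySem.Set.contains b1 e)) = true := by
          rw [hb1, hb2]; rfl
        rw [if_pos hcnd] at hfi
        have hc1 : c1 = true := (congrArg Prod.snd hfi).symm
        rw [i4 hc1] at hf
        exact absurd hf (by simp)
      · exact hcl s e h hsb
    · subst hb; subst hc
      have hb1mem : ∀ x ∈ b0, x ∈ (b0 ++ [e] : List Int) := by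
        intro x hx; exact List.mem_append.mpr (Or.inl hx)
      have hemem : e ∈ pvTargets inv := mem_pvTargets (hre ▸ hrow)
      refine ⟨?_, ?_, ?_, ?_, ?_, ?_, ?_⟩
      · intro x hx; exact i1 x (hb1mem x hx)
      · intro x hx
        rcases i2 x hx with h | h
        · rcases List.mem_append.mp h with h' | h'
          · exact Or.inl h'
          · simp at h'; subst h'; exact Or.inr hemem
        · exact Or.inr h
      · intro hnd
        refine i3 (List.Nodup.append hnd (List.nodup_singleton _) ?_)
        intro a ha hb
        simp only [List.mem_singleton] at hb
        exact he (hb ▸ ha)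
      · intro _; exact i4 rfl
      · intro hf
        rw [i4 rfl] at hf
        exact absurd hf (by simp)
      · have : (b0 ++ [e] : List Int).length ≤ _ := i6
        simp only [List.length_append, List.length_cons, List.length_nil] at this
        omega
      · intro _ _
        have : (b0 ++ [e] : List Int).length ≤ _ := i6
        simp only [List.length_append, List.length_cons, List.length_nil] at this
        omega

theorem pvLoopB_succ (inv : List (List Int)) (fuel : Nat) (bugs : PySem.Set Int) :
    pvLoopB inv (fuel + 1) bugs
      = if (pvPassB inv bugs).2 then pvLoopB inv fuel (pvPassB inv bugs).1
        else (pvPassB inv bugs).1 := rfl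

-- with enough fuel, B's loop reaches a fixpoint: its result is edge-closed
theorem loopB_closed (inv : List (List Int)) (k : Int) :
    ∀ (fuel : Nat) (bugs : PySem.Set Int),
      bugs.Nodup →
      (∀ x ∈ bugs, x = k ∨ x ∈ pvTargets inv) →
      (pvUniv inv k).card < fuel + bugs.length →
      (∀ x ∈ bugs, x ∈ pvLoopB inv fuel bugs) ∧
      (∀ s e, [s, e] ∈ inv → s ∈ pvLoopB inv fuel bugs → e ∈ pvLoopB inv fuel bugs) := by
  intro fuel
  induction fuel with
  | zero =>
    intro bugs hnd hU hcnt
    have := pv_len_le_univ hnd hU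
    omega
  | succ fuel ih =>
    intro bugs hnd hU hcnt
    rw [pvLoopB_succ]
    obtain ⟨i1, i2, i3, i4, i5, i6, i7⟩ :=
      passB_fold_facts inv inv bugs false (fun r h => h)
    rcases hflag : (pvPassB inv bugs).2 with _ | _
    · -- changed = False: fixpoint reached
      simp only [hflag, Bool.false_eq_true, if_false]
      obtain ⟨hfix, hcl⟩ := i5 hflag
      have hfix' : (pvPassB inv bugs).1 = bugs := hfix
      rw [hfix']
      exact ⟨fun x h => h, fun s e he hs => hcl s e he hs⟩
    · -- changed = True: the set grew strictly; recurse
      simp only [hflag, if_true]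
      have hgrow : bugs.length < (pvPassB inv bugs).1.length := i7 rfl hflag
      have hnd' : (pvPassB inv bugs).1.Nodup := i3 hnd
      have hU' : ∀ x ∈ (pvPassB inv bugs).1, x = k ∨ x ∈ pvTargets inv := by
        intro x hx
        rcases i2 x hx with h | h
        · exact hU x h
        · exact Or.inr h
      have hcnt' : (pvUniv inv k).card < fuel + (pvPassB inv bugs).1.length := by omega
      obtain ⟨ihm, ihc⟩ := ih (pvPassB inv bugs).1 hnd' hU' hcnt'
      exact ⟨fun x hx => ihm x (i1 x hx), ihc⟩

-- B's loop only adds reachable methods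
theorem loopB_sound (inv : List (List Int)) (k : Int) :
    ∀ (fuel : Nat) (bugs : PySem.Set Int),
      (∀ x ∈ bugs, PvReach inv k x) →
      ∀ x ∈ pvLoopB inv fuel bugs, PvReach inv k x := by
  have hpass : ∀ (l : List (List Int)) (st : PySem.Set Int × Bool),
      (∀ row ∈ l, row ∈ inv) → (∀ x ∈ st.1, PvReach inv k x) →
      ∀ x ∈ (l.foldl pvRelaxB st).1, PvReach inv k x := by
    intro l
    induction l with
    | nil => intro st _ hst x hx; exact hst x hx
    | cons row l ihl =>
      intro st hsub hst
      have hrow : row ∈ inv := hsub row List.mem_cons_self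
      simp only [List.foldl_cons]
      refine ihl _ (fun r h => hsub r (List.mem_cons_of_mem _ h)) ?_
      intro x hx
      rcases row with _ | ⟨s, _ | ⟨e, _ | ⟨z, t⟩⟩⟩
      · exact hst x hx
      · exact hst x hx
      · have hx2 : x ∈ (if (PySem.Set.contains st.1 s && !(PySem.Set.contains st.1 e)) = true
            then (PySem.Set.add st.1 e, true) else st).1 := hx
        by_cases hc : (PySem.Set.contains st.1 s && !(PySem.Set.contains st.1 e)) = true
        · rw [if_pos hc] at hx2
          rcases (PySem.Set.mem_add _ _ _).mp hx2 with h | h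
          · exact hst x h
          · subst h
            have hs : s ∈ st.1 := (PySem.Set.contains_iff _ _).mp ((Bool.and_eq_true _ _).mp hc).1
            exact PvReach.step (hst s hs) hrow
        · rw [if_neg hc] at hx2
          exact hst x hx2
      · exact hst x hx
  intro fuel
  induction fuel with
  | zero => intro bugs hb x hx; exact hb x hx
  | succ fuel ih =>
    intro bugs hb
    rw [pvLoopB_succ]
    rcases hflag : (pvPassB inv bugs).2 with _ | _
    · simp only [hflag, Bool.false_eq_true, if_false]
      exact hpass inv (bugs, false) (fun r h => h) hb
    · simp only [hflag, if_true]
      exact ih _ (hpass inv (bugs, false) (fun r h => h) hb)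

-- membership of B's bug set = reachability
theorem bugsB_iff (inv : List (List Int)) (k : Int) (x : Int) :
    x ∈ pvLoopB inv (inv.length + 1) (PySem.Set.ofList [k]) ↔ PvReach inv k x := by
  have hof : PySem.Set.ofList [k] = [k] := rfl
  constructor
  · intro hx
    refine loopB_sound inv k _ _ ?_ x hx
    intro y hy; rw [hof] at hy; simp at hy; subst hy; exact PvReach.base
  · intro hr
    have hcnt : (pvUniv inv k).card < (inv.length + 1) + (PySem.Set.ofList [k] : List Int).length := by
      have := pvUniv_card_le inv k
      rw [hof]
      simp only [List.length_cons, List.length_nil]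
      omega
    obtain ⟨hm, hc⟩ := loopB_closed inv k (inv.length + 1) (PySem.Set.ofList [k])
      (PySem.Set.nodup_ofList _)
      (by intro y hy; rw [hof] at hy; simp at hy; exact Or.inl hy)
      hcnt
    induction hr with
    | base => exact hm k (by rw [hof]; exact List.mem_cons_self)
    | step hs he ihr => exact hc _ _ he ihr

-- A's nested scan over the bug set and the parents lists decides the same existential
theorem condA_iff (inv : List (List Int)) (S : PySem.Set Int) :
    ((S.any (fun i => ((pvBuildMapsA inv).2.getD i []).any
        (fun fa => !(PySem.Set.contains S fa)))) = true)
    ↔ ∃ s e, [s, e] ∈ inv ∧ e ∈ S ∧ s ∉ S := by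
  simp only [List.any_eq_true]
  constructor
  · rintro ⟨i, hi, fa, hfa, hnb⟩
    refine ⟨fa, i, mem_parentsA.mp hfa, hi, ?_⟩
    simpa using hnb
  · rintro ⟨s, e, he, heS, hsS⟩
    exact ⟨e, heS, s, mem_parentsA.mpr he, by simpa using hsS⟩

-- B's single edge scan decides the same existential (under Pre_)
theorem condB_iff (inv : List (List Int)) (S : PySem.Set Int)
    (hpre : ∀ row ∈ inv, row.length = 2) :
    ((inv.any (fun row =>
        match row with
        | [s, e] => PySem.Set.contains S e && !(PySem.Set.contains S s)
        | _ => false)) = true)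
    ↔ ∃ s e, [s, e] ∈ inv ∧ e ∈ S ∧ s ∉ S := by
  simp only [List.any_eq_true]
  constructor
  · rintro ⟨row, hrow, hcond⟩
    rcases row with _ | ⟨a, _ | ⟨b, _ | ⟨c, t⟩⟩⟩
    · simp at hcond
    · simp at hcond
    · simp only [Bool.and_eq_true] at hcond
      refine ⟨a, b, hrow, ?_, ?_⟩
      · exact (PySem.Set.contains_iff _ _).mp hcond.1
      · intro hmem
        have := hcond.2
        rw [(PySem.Set.contains_iff _ _).mpr hmem] at this
        simp at this
    · have := hpre _ hrow; simp at this
  · rintro ⟨s, e, he, heS, hsS⟩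
    refine ⟨[s, e], he, ?_⟩
    simp only [Bool.and_eq_true]
    constructor
    · exact (PySem.Set.contains_iff _ _).mpr heS
    · simp only [Bool.not_eq_eq_eq_not, Bool.not_true, ← Bool.not_eq_true]
      intro hcon
      exact hsS ((PySem.Set.contains_iff _ _).mp hcon)

-- ===== VERDICT (by name: the statement is the Claim_ definition above) =====
theorem remainingMethods_spec : Claim_equal_remainingMethods := by
  intro n k inv _ hpre
  unfold Spec_remainingMethods
  simp only [remainingMethods, remainingMethods_alt]
  set SA := pvBfsA (pvBuildMapsA inv).1 (inv.length + 1) [k] (PySem.Set.ofList [k]) with hSA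
  set SB := pvLoopB inv (inv.length + 1) (PySem.Set.ofList [k]) with hSB
  have hmem : ∀ x, x ∈ SA ↔ x ∈ SB := by
    intro x
    rw [hSA, hSB, bugsA_iff, bugsB_iff]
  have hcont : ∀ x, PySem.Set.contains SA x = PySem.Set.contains SB x := by
    intro x
    rw [Bool.eq_iff_iff, PySem.Set.contains_iff, PySem.Set.contains_iff]
    exact hmem x
  have hcond : (SA.any (fun i => ((pvBuildMapsA inv).2.getD i []).any
        (fun fa => !(PySem.Set.contains SA fa))))
      = (inv.any (fun row =>
        match row with
        | [s, e] => PySem.Set.contains SB e && !(PySem.Set.contains SB s)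
        | _ => false)) := by
    rw [Bool.eq_iff_iff, condA_iff inv SA, condB_iff inv SB hpre]
    constructor
    · rintro ⟨s, e, h1, h2, h3⟩
      exact ⟨s, e, h1, (hmem e).mp h2, fun h => h3 ((hmem s).mpr h)⟩
    · rintro ⟨s, e, h1, h2, h3⟩
      exact ⟨s, e, h1, (hmem e).mpr h2, fun h => h3 ((hmem s).mp h)⟩
  rw [hcond]
  split_ifs with h
  · rfl
  · exact List.filter_congr (fun i _ => by rw [hcont i])
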